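-- pv_equiv track=rewrite | github.com/PollyLeo6/Anagram-Solver | interactive_solver.py | solve_anagram
-- ===== SOURCE A (Python) =====
-- from collections import Counter
--
-- def solve_anagram(letters, dictionary):
--     """Solve anagram by finding valid words"""
--     letters = letters.lower().replace(' ', '')
--     letter_count = Counter(letters)
--     solutions = []
--
--     # Try single words first
--     for word in dictionary:
--         if len(word) <= len(letters) and Counter(word) <= letter_count:
--             solutions.append([word])
--
--     # Try combinations of 2 words
--     remaining_letters = letters
--     for word1 in dictionary:
--         if len(word1) < len(letters) and Counter(word1) <= letter_count:
--             temp_count = letter_count - Counter(word1)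
--             remaining = ''.join(temp_count.elements())
--
--             for word2 in dictionary:
--                 if len(word2) <= len(remaining) and Counter(word2) <= temp_count:
--                     if len(word1) + len(word2) == len(letters):
--                         solutions.append([word1, word2])
--
--     # Remove duplicates and sort by length
--     unique_solutions = []
--     for sol in solutions:
--         sorted_sol = sorted(sol)
--         if sorted_sol not in unique_solutions:
--             unique_solutions.append(sorted_sol)
--
--     return sorted(unique_solutions, key=lambda x: len(x))
-- ===== SOURCE B (Python) =====
-- from collections import Counter
--
-- def solve_anagram(letters, dictionary):
--     """Solve anagram by finding valid words"""
--     letters = letters.lower().replace(' ', '')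
--     n = len(letters)
--     letter_count = Counter(letters)
--
--     # Bucket the dictionary by sorted-letter signature (dictionary order kept),
--     # so the partners of word1 are found by ONE lookup instead of a full scan.
--     by_signature = {}
--     for word in dictionary:
--         by_signature.setdefault(''.join(sorted(word)), []).append(word)
--
--     result = []
--     seen = set()
--     # single words, first occurrence of each word kept
--     for word in dictionary:
--         if len(word) <= n and Counter(word) <= letter_count and word not in seen:
--             seen.add(word)
--             result.append([word])
--
--     # two-word combinations: word2 must be an exact anagram of the remaining letters
--     seen_pairs = set()
--     for word1 in dictionary:
--         if len(word1) < n and Counter(word1) <= letter_count: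
--             remaining = ''.join(sorted((letter_count - Counter(word1)).elements()))
--             for word2 in by_signature.get(remaining, []):
--                 pair = (word1, word2) if word1 <= word2 else (word2, word1)
--                 if pair not in seen_pairs:
--                     seen_pairs.add(pair)
--                     result.append([pair[0], pair[1]])
--     return result
-- ===== Notes on version B (the rewrite author's own statement) =====
-- stated objective: faster
-- what changed: B buckets the dictionary once by sorted-letter signature so each word1's partners come from one hash lookup instead of a second full dictionary scan, and it deduplicates on the fly with sets instead of list membership plus a final sort.
import Mathlib
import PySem

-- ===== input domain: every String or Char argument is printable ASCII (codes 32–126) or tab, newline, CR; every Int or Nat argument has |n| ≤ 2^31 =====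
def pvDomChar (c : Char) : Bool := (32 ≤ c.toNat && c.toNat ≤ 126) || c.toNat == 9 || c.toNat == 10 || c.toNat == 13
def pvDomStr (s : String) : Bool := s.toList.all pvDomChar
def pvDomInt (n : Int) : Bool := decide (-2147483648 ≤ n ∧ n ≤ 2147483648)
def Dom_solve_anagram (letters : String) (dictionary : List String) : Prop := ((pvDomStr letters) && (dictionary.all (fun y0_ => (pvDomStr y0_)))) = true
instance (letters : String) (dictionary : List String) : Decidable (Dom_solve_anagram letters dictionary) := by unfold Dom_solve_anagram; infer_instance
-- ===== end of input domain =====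

-- B replaces A's inner full-dictionary scan (per word1) by one lookup in a hash
-- index keyed by sorted-letter signature, and dedups on the fly with sets;
-- objective: faster (asymptotic: O(D^2*L) nested scans become O(D*L log L)).

-- ===== PORT A =====
-- shared Counter helpers (both Pythons use collections.Counter the same way)
-- Counter(s) over the characters of a string
-- Python's Counter.__le__: all(self[e] <= other[e]) over the keys of both sides
def pvCounterLe (c1 c2 : PySem.Dict Char Int) : Bool :=
  c1.items.all (fun p => decide (p.2 ≤ c2.getD p.1 0)) &&
  c2.items.all (fun p => decide (c1.getD p.1 0 ≤ p.2))

-- Python's Counter.__sub__ keeps only positive differences, in c1's key order.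
-- (Its second loop, over keys of c2 with NEGATIVE counts, is a no-op here:
-- counters of strings have positive counts only, so it is not transcribed.)
def pvCounterSub (c1 c2 : PySem.Dict Char Int) : PySem.Dict Char Int :=
  c1.items.foldl (fun d p =>
    if 0 < p.2 - c2.getD p.1 0 then d.insert p.1 (p.2 - c2.getD p.1 0) else d)
    PySem.Dict.empty

-- Counter.elements(): each key repeated by its count, in key order
def pvElements (c : PySem.Dict Char Int) : List Char :=
  c.items.foldl (fun acc p => acc ++ List.replicate p.2.toNat p.1) []

-- letters.lower().replace(' ', '')
def pvClean (letters : String) : List Char :=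
  PySem.Chars.replace (PySem.Chars.lower letters.toList) [' '] []

def solve_anagram (letters : String) (dictionary : List String) : List (List String) :=
  let ls := pvClean letters
  let letter_count := PySem.Dict.counter ls
  -- single words
  let solutions : List (List String) :=
    dictionary.foldl (fun acc word =>
      if word.toList.length ≤ ls.length &&
         pvCounterLe (PySem.Dict.counter word.toList) letter_count
      then acc ++ [[word]] else acc) []
  -- combinations of 2 words
  let solutions : List (List String) :=
    dictionary.foldl (fun acc word1 =>
      if word1.toList.length < ls.length &&
         pvCounterLe (PySem.Dict.counter word1.toList) letter_count then
        let temp_count := pvCounterSub letter_count (PySem.Dict.counter word1.toList)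
        let remaining := pvElements temp_count
        dictionary.foldl (fun acc word2 =>
          if word2.toList.length ≤ remaining.length &&
             pvCounterLe (PySem.Dict.counter word2.toList) temp_count then
            if word1.toList.length + word2.toList.length == ls.length
            then acc ++ [[word1, word2]] else acc
          else acc) acc
      else acc) solutions
  -- remove duplicates and sort by length
  let unique_solutions : List (List String) :=
    solutions.foldl (fun u sol =>
      let sorted_sol := PySem.List.sorted sol (fun x => x) false
      if u.contains sorted_sol then u else u ++ [sorted_sol]) []
  PySem.List.sorted unique_solutions (fun x => x.length) false

-- ===== PORT B =====
-- ''.join(sorted(word))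
def pvSig (w : List Char) : List Char := PySem.List.sorted w (fun c => c) false

def solve_anagram_alt (letters : String) (dictionary : List String) : List (List String) :=
  let ls := pvClean letters
  let n := ls.length
  let letter_count := PySem.Dict.counter ls
  -- bucket the dictionary by sorted-letter signature
  let by_signature : PySem.Dict (List Char) (List String) :=
    dictionary.foldl (fun d word =>
      d.modify (pvSig word.toList) [] (· ++ [word])) PySem.Dict.empty
  -- single words, dedup on the fly with a set
  let st1 : List (List String) × PySem.Set String :=
    dictionary.foldl (fun st word =>
      if word.toList.length ≤ n &&
         pvCounterLe (PySem.Dict.counter word.toList) letter_count &&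
         !(PySem.Set.contains st.2 word)
      then (st.1 ++ [[word]], PySem.Set.add st.2 word) else st) ([], PySem.Set.empty)
  -- two-word combinations: partners of word1 come from one bucket lookup
  let st2 : List (List String) × PySem.Set (String × String) :=
    dictionary.foldl (fun st word1 =>
      if word1.toList.length < n &&
         pvCounterLe (PySem.Dict.counter word1.toList) letter_count then
        let remaining :=
          pvSig (pvElements (pvCounterSub letter_count (PySem.Dict.counter word1.toList)))
        (by_signature.getD remaining []).foldl (fun st word2 =>
          let pair := if word1 ≤ word2 then (word1, word2) else (word2, word1)
          if PySem.Set.contains st.2 pair then st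
          else (st.1 ++ [[pair.1, pair.2]], PySem.Set.add st.2 pair)) st
      else st) (st1.1, PySem.Set.empty)
  st2.1

-- ===== PRECONDITION & SPEC =====
def Spec_solve_anagram (letters : String) (dictionary : List String) (out : List (List String)) : Prop := out = solve_anagram_alt letters dictionary
instance (letters : String) (dictionary : List String) (out : List (List String)) : Decidable (Spec_solve_anagram letters dictionary out) := by unfold Spec_solve_anagram; infer_instance

-- ===== CLAIM (what is proved, stated in full; the proofs are below) =====
def Claim_equal_solve_anagram : Prop := ∀ (letters : String) (dictionary : List String), Dom_solve_anagram letters dictionary → Spec_solve_anagram letters dictionary (solve_anagram letters dictionary)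

-- ===== LEMMAS AND PROOFS =====

theorem getD_zero_of_not_mem_keys (d : PySem.Dict Char Int) (c : Char) (h : c ∉ d.keys) :
    d.getD c 0 = 0 := by
  simp only [PySem.Dict.getD, PySem.Dict.get?]
  rw [List.find?_eq_none.2]
  · rfl
  · intro p hp hbeq
    have hmem : p.1 ∈ d.keys := by
      simp only [PySem.Dict.keys]
      exact List.mem_map_of_mem (f := Prod.fst) hp
    rw [beq_iff_eq.1 hbeq] at hmem
    exact absurd hmem h

theorem cLe_iff (w : List Char) (d : PySem.Dict Char Int) (hnd : d.keys.Nodup) :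
    pvCounterLe (PySem.Dict.counter w) d = true ↔ ∀ c, (w.count c : Int) ≤ d.getD c 0 := by
  unfold pvCounterLe
  rw [Bool.and_eq_true, List.all_eq_true, List.all_eq_true]
  constructor
  · rintro ⟨h1, h2⟩ c
    by_cases hw : c ∈ w
    · have := h1 ⟨c, (w.count c : Int)⟩ (by
        rw [PySem.Dict.items_counter]
        exact List.mem_map.2 ⟨c, (PySem.Set.mem_ofList w c).2 hw, rfl⟩)
      simpa using this
    · by_cases hk : c ∈ d.keys
      · have hp : (⟨c, d.getD c 0⟩ : Char × Int) ∈ d.items := by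
          rw [PySem.Dict.items_eq_map_keys d hnd 0]
          exact List.mem_map.2 ⟨c, hk, rfl⟩
        have := h2 _ hp
        simp only [PySem.Dict.getD_counter] at this
        simpa [List.count_eq_zero_of_not_mem hw] using this
      · simp [getD_zero_of_not_mem_keys d c hk, List.count_eq_zero_of_not_mem hw]
  · intro h
    constructor
    · intro p hp
      rw [PySem.Dict.items_counter] at hp
      obtain ⟨k, hk, rfl⟩ := List.mem_map.1 hp
      simpa using h k
    · intro p hp
      rw [PySem.Dict.items_eq_map_keys d hnd 0] at hp
      obtain ⟨k, hk, rfl⟩ := List.mem_map.1 hp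
      simpa [PySem.Dict.getD_counter] using h k

theorem items_foldl_insert_if (P : Char × Int → Prop) [DecidablePred P]
    (f : Char × Int → Int) (ps : List (Char × Int)) :
    ∀ d : PySem.Dict Char Int, (ps.map Prod.fst).Nodup →
    (∀ p ∈ ps, d.contains p.1 = false) →
    (ps.foldl (fun d p => if P p then d.insert p.1 (f p) else d) d).items
      = d.items ++ (ps.filter P).map (fun p => (p.1, f p)) := by
  induction ps with
  | nil => intro d _ _; simp
  | cons q t ih =>
    intro d hnd hf
    simp only [List.map_cons, List.nodup_cons] at hnd
    by_cases hP : P q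
    · have hins : (d.insert q.1 (f q)).items = d.items ++ [(q.1, f q)] := by
        have := PySem.Dict.items_foldl_insert_fresh [q] Prod.fst f d
          (by intro a ha; simp only [List.mem_singleton] at ha; subst ha
              exact hf _ (by simp))
          (by simp)
        simpa using this
      have hcont : ∀ p ∈ t, (d.insert q.1 (f q)).contains p.1 = false := by
        intro p hp
        simp only [PySem.Dict.contains, hins, List.any_append, List.any_cons, List.any_nil,
          Bool.or_eq_false_iff]
        refine ⟨by simpa [PySem.Dict.contains] using hf p (by simp [hp]), ?_⟩
        simp only [beq_eq_false_iff_ne, ne_eq]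
        exact ⟨fun hc => hnd.1 (hc ▸ List.mem_map_of_mem (f := Prod.fst) hp), trivial⟩
      simp only [List.foldl_cons, if_pos hP, List.filter_cons]
      rw [ih _ hnd.2 hcont, hins]
      simp [hP]
    · simp only [List.foldl_cons, List.filter_cons]
      rw [if_neg hP, ih _ hnd.2 (fun p hp => hf p (by simp [hp]))]
      simp [hP]

def pvTemp (ls : List Char) (w1 : String) : PySem.Dict Char Int :=
  pvCounterSub (PySem.Dict.counter ls) (PySem.Dict.counter w1.toList)

def pvRem (ls : List Char) (w1 : String) : List Char := pvElements (pvTemp ls w1)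

theorem temp_items (ls : List Char) (w1 : String) :
    (pvTemp ls w1).items =
      ((PySem.Set.ofList ls).filter
          (fun c => decide ((w1.toList.count c : Int) < (ls.count c : Int)))).map
        (fun c => (c, (ls.count c : Int) - (w1.toList.count c : Int))) := by
  unfold pvTemp pvCounterSub
  rw [PySem.Dict.items_counter ls]
  have hfold := items_foldl_insert_if
    (fun p : Char × Int => 0 < p.2 - (PySem.Dict.counter w1.toList).getD p.1 0)
    (fun p => p.2 - (PySem.Dict.counter w1.toList).getD p.1 0)
    ((PySem.Set.ofList ls).map (fun k => (k, (ls.count k : Int))))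
    PySem.Dict.empty
    (by rw [List.map_map]; simpa [Function.comp_def] using PySem.Set.nodup_ofList ls)
    (by intro p _; rfl)
  rw [hfold]
  rw [List.filter_map, List.map_map]
  simp only [Function.comp_def, PySem.Dict.getD_counter]
  have hemp : (PySem.Dict.empty : PySem.Dict Char Int).items = [] := rfl
  rw [hemp, List.nil_append]
  congr 1
  apply List.filter_congr
  intro c _
  rw [decide_eq_decide]
  omega

theorem temp_keys_nodup (ls : List Char) (w1 : String) : (pvTemp ls w1).keys.Nodup := by
  simp only [PySem.Dict.keys, temp_items, List.map_map, Function.comp_def]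
  simpa [Function.comp_def] using ((PySem.Set.nodup_ofList ls).filter _)

theorem find?_beq (c : Char) (xs : List Char) :
    xs.find? (fun x => x == c) = if c ∈ xs then some c else none := by
  induction xs with
  | nil => simp
  | cons x t ih =>
    by_cases hx : x = c
    · subst hx
      rw [List.find?_cons_of_pos (by simp)]
      simp
    · rw [List.find?_cons_of_neg (by simpa using hx), ih]
      by_cases hm : c ∈ t
      · rw [if_pos hm, if_pos (List.mem_cons_of_mem _ hm)]
      · rw [if_neg hm, if_neg (by simp [hm, Ne.symm hx])]

theorem temp_getD (ls : List Char) (w1 : String)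
    (hle : ∀ c, w1.toList.count c ≤ ls.count c) (c : Char) :
    (pvTemp ls w1).getD c 0 = (ls.count c : Int) - (w1.toList.count c : Int) := by
  simp only [PySem.Dict.getD, PySem.Dict.get?, temp_items]
  rw [List.find?_map]
  have hcomp : ((fun p : Char × Int => p.1 == c) ∘
      (fun c' => (c', (ls.count c' : Int) - w1.toList.count c'))) = fun x => x == c := rfl
  rw [hcomp, find?_beq]
  split_ifs with hm
  · rfl
  · simp only [Option.map_none, Option.getD_none]
    have hle' := hle c
    by_cases hcl : c ∈ ls
    · have hnl : ¬ (w1.toList.count c : Int) < (ls.count c : Int) := fun hlt =>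
        hm (List.mem_filter.2 ⟨(PySem.Set.mem_ofList ls c).2 hcl, by simpa using hlt⟩)
      omega
    · have h0 : ls.count c = 0 := List.count_eq_zero_of_not_mem hcl
      omega

theorem count_flatMap_replicate (g : Char → Nat) (c : Char) (xs : List Char) (hnd : xs.Nodup) :
    (xs.flatMap (fun k => List.replicate (g k) k)).count c = if c ∈ xs then g c else 0 := by
  induction xs with
  | nil => simp
  | cons x t ih =>
    simp only [List.nodup_cons] at hnd
    rw [List.flatMap_cons, List.count_append, List.count_replicate, ih hnd.2]
    by_cases hx : x = c
    · subst hx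
      simp [hnd.1]
    · by_cases hm : c ∈ t <;> simp [hx, hm, Ne.symm hx]

theorem rem_eq_flatMap (ls : List Char) (w1 : String) :
    pvRem ls w1 = ((PySem.Set.ofList ls).filter
        (fun c => decide ((w1.toList.count c : Int) < (ls.count c : Int)))).flatMap
      (fun c => List.replicate ((ls.count c : Int) - (w1.toList.count c : Int)).toNat c) := by
  unfold pvRem pvElements
  rw [temp_items, PySem.List.foldl_append_eq_flatMap, List.nil_append, List.flatMap_map]

theorem rem_count (ls : List Char) (w1 : String) (c : Char) :
    (pvRem ls w1).count c = ls.count c - w1.toList.count c := by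
  rw [rem_eq_flatMap]
  rw [count_flatMap_replicate _ _ _ ((PySem.Set.nodup_ofList ls).filter _)]
  by_cases hm : c ∈ (PySem.Set.ofList ls).filter
      (fun c' => decide ((w1.toList.count c' : Int) < (ls.count c' : Int)))
  · rw [if_pos hm]
    omega
  · rw [if_neg hm]
    have : ¬ ((w1.toList.count c : Int) < (ls.count c : Int)) ∨ c ∉ ls := by
      by_cases hcl : c ∈ ls
      · left; intro hlt
        exact hm (List.mem_filter.2 ⟨(PySem.Set.mem_ofList ls c).2 hcl, by simpa using hlt⟩)
      · right; exact hcl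
    rcases this with h | h
    · omega
    · have h0 : ls.count c = 0 := List.count_eq_zero_of_not_mem h
      omega

theorem rem_perm_sub (ls : List Char) (w1 : String) :
    (pvRem ls w1 : Multiset Char) = (ls : Multiset Char) - (w1.toList : Multiset Char) := by
  ext c
  rw [Multiset.count_sub]
  simpa [Multiset.coe_count] using rem_count ls w1 c

theorem rem_length (ls : List Char) (w1 : String)
    (hle : ∀ c, w1.toList.count c ≤ ls.count c) :
    (pvRem ls w1).length = ls.length - w1.toList.length := by
  have hsub : (w1.toList : Multiset Char) ≤ (ls : Multiset Char) := by
    rw [Multiset.le_iff_count]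
    intro c
    simpa [Multiset.coe_count] using hle c
  have := congrArg Multiset.card (rem_perm_sub ls w1)
  rw [Multiset.card_sub hsub] at this
  simpa using this

-- A's inner-loop test equals "word2 is an exact anagram of the remaining letters"
theorem inner_iff (ls : List Char) (w1 w2 : String)
    (hle1 : ∀ c, w1.toList.count c ≤ ls.count c)
    (h1 : w1.toList.length < ls.length) :
    ((w2.toList.length ≤ (pvRem ls w1).length &&
        pvCounterLe (PySem.Dict.counter w2.toList) (pvTemp ls w1)) &&
      (w1.toList.length + w2.toList.length == ls.length))
    = (pvSig w2.toList == pvSig (pvRem ls w1)) := by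
  have hlen1 : w1.toList.length ≤ ls.length := le_of_lt h1
  have hrl := rem_length ls w1 hle1
  rw [Bool.eq_iff_iff, Bool.and_eq_true, Bool.and_eq_true, beq_iff_eq, beq_iff_eq]
  rw [cLe_iff _ _ (temp_keys_nodup ls w1)]
  simp only [decide_eq_true_eq]
  unfold pvSig
  rw [PySem.List.sorted_id_eq_sorted_id_iff_perm, List.perm_iff_count]
  constructor
  · rintro ⟨⟨hlen2, hcnt⟩, hsum⟩ c
    have := hcnt c
    rw [temp_getD ls w1 hle1 c] at this
    have hc : w2.toList.count c ≤ (pvRem ls w1).count c := by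
      rw [rem_count]
      have := hle1 c
      omega
    -- pointwise ≤ plus equal total length forces equality
    have hsp : w2.toList.Subperm (pvRem ls w1) :=
      List.subperm_ext_iff.2 (fun x _ => by
        have h' := hcnt x
        rw [temp_getD ls w1 hle1 x] at h'
        rw [rem_count]
        have := hle1 x
        omega)
    have hsum' : w1.toList.length + w2.toList.length = ls.length := hsum
    have hperm : w2.toList.Perm (pvRem ls w1) :=
      hsp.perm_of_length_le (by omega)
    exact hperm.count_eq c
  · intro hcount
    have hlen : w2.toList.length = (pvRem ls w1).length :=
      (List.perm_iff_count.2 hcount).length_eq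
    refine ⟨⟨by omega, fun c => ?_⟩, by omega⟩
    rw [temp_getD ls w1 hle1 c, hcount c, rem_count]
    have := hle1 c
    omega

theorem bucket_getD (dict : List String) (s : List Char) :
    (dict.foldl (fun d w => d.modify (pvSig w.toList) [] (· ++ [w]))
        PySem.Dict.empty).getD s []
      = dict.filter (fun w => pvSig w.toList == s) := by
  have h1 : dict.foldl (fun d w => d.modify (pvSig w.toList) [] (· ++ [w])) PySem.Dict.empty
      = (dict.map (fun w => (pvSig w.toList, w))).foldl
          (fun d p => d.modify p.1 [] (· ++ [p.2])) PySem.Dict.empty := by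
    rw [List.foldl_map]
  rw [h1, PySem.Dict.getD_foldl_modify_append]
  rw [List.filter_map, List.map_map]
  simp [Function.comp_def, PySem.Dict.getD, PySem.Dict.get?, PySem.Dict.empty]

theorem sorted_single (x : String) : PySem.List.sorted [x] (fun y => y) false = [x] := rfl

theorem sorted_pair (a b : String) :
    PySem.List.sorted [a, b] (fun y => y) false = if a ≤ b then [a, b] else [b, a] := by
  rw [PySem.List.sorted_eq_foldl_insertBy]
  simp only [List.foldl_cons, List.foldl_nil, PySem.List.insertBy]
  split_ifs with h1 h2 h2
  · exact absurd h2 (not_le.2 (of_decide_eq_true h1))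
  · rfl
  · rfl
  · exact absurd (not_lt.1 (fun hh => h1 (decide_eq_true hh))) h2
def pvPlist (q : String × String) : List String := [q.1, q.2]

def pvKeyOf (q : String × String) : String × String := if q.1 ≤ q.2 then q else (q.2, q.1)

def pvDedupStep (u : List (List String)) (sol : List String) : List (List String) :=
  if u.contains (PySem.List.sorted sol (fun x => x) false) then u
  else u ++ [PySem.List.sorted sol (fun x => x) false]

theorem pair_sorted_key (q : String × String) :
    PySem.List.sorted [q.1, q.2] (fun y => y) false = pvPlist (pvKeyOf q) := by
  rw [sorted_pair]
  unfold pvKeyOf pvPlist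
  split_ifs <;> rfl

theorem beq_pair_singleton (a b x : String) : (([a, b] : List String) == [x]) = false := by
  simp [List.cons_beq_cons]

theorem beq_plist (k q : String × String) : (pvPlist k == pvPlist q) = (k == q) := by
  simp only [pvPlist, List.cons_beq_cons]
  cases k; cases q
  simp [Bool.and_assoc]
  rfl

theorem contains_map_singleton (s : List String) (w : String) :
    ((s.map (fun x => [x])).contains ([w] : List String)) = s.contains w := by
  induction s with
  | nil => rfl
  | cons x t ih =>
    simp only [List.map_cons, List.contains_cons, ih, List.cons_beq_cons]
    rw [show (([] : List String) == []) = true from rfl]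
    simp only [Bool.and_true]

theorem contains_map_singleton_pair (s : List String) (q : String × String) :
    ((s.map (fun x => [x])).contains (pvPlist q)) = false := by
  induction s with
  | nil => rfl
  | cons x t ih =>
    simp only [List.map_cons, List.contains_cons, ih, Bool.or_false]
    rw [show pvPlist q = [q.1, q.2] from rfl, beq_pair_singleton]

-- A's dedup pass over the singleton solutions is ordered dedup (set building)
theorem dedupA_singles (ws : List String) : ∀ s : List String,
    (ws.map (fun w => [w])).foldl pvDedupStep (s.map (fun w => [w]))
      = (PySem.Set.update s ws).map (fun w => [w]) := by
  induction ws with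
  | nil => intro s; simp [PySem.Set.update]
  | cons w t ih =>
    intro s
    have hstep : pvDedupStep (s.map (fun x => [x])) [w]
        = (PySem.Set.add s w).map (fun x => [x]) := by
      unfold pvDedupStep PySem.Set.add
      rw [sorted_single, contains_map_singleton]
      simp only [PySem.Set.contains]
      split_ifs with h
      · rfl
      · simp
    simp only [List.map_cons, List.foldl_cons, hstep]
    have := ih (PySem.Set.add s w)
    simpa [PySem.Set.update] using this

-- B's single-word pass: on-the-fly set dedup of the filtered dictionary
theorem singlesB (p : String → Bool) (dict : List String) : ∀ s : List String,
    dict.foldl (fun st w =>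
        if p w && !(PySem.Set.contains st.2 w)
        then (st.1 ++ [[w]], PySem.Set.add st.2 w) else st)
      ((s.map (fun w => [w]) : List (List String)), (s : PySem.Set String))
      = ((PySem.Set.update s (dict.filter p)).map (fun w => [w]),
         PySem.Set.update s (dict.filter p)) := by
  induction dict with
  | nil => intro s; simp [PySem.Set.update]
  | cons w t ih =>
    intro s
    simp only [List.foldl_cons, List.filter_cons]
    by_cases hp : p w
    · rw [if_pos hp]
      by_cases hc : PySem.Set.contains s w
      · have hc' : w ∈ s := by simpa [PySem.Set.contains] using hc
        have hcond : (p w && !(PySem.Set.contains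
            ((s.map (fun w => [w]) : List (List String)), (s : PySem.Set String)).2 w)) = false := by
          simp [hp, hc', PySem.Set.contains]
        rw [hcond]
        simp only [Bool.false_eq_true, if_false]
        rw [ih s]
        have hupd : PySem.Set.update s (w :: t.filter p) = PySem.Set.update s (t.filter p) := by
          simp only [PySem.Set.update, List.foldl_cons]
          rw [show PySem.Set.add s w = s by simp [PySem.Set.add, PySem.Set.contains, hc']]
        rw [hupd]
      · have hc' : ¬ w ∈ s := by
          intro hm
          exact hc (by simpa [PySem.Set.contains] using hm)
        have hcond : (p w && !(PySem.Set.contains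
            ((s.map (fun w => [w]) : List (List String)), (s : PySem.Set String)).2 w)) = true := by
          simp [hp, hc', PySem.Set.contains]
        rw [hcond]
        simp only [if_true]
        have hadd : PySem.Set.add s w = s ++ [w] := by
          simp [PySem.Set.add, PySem.Set.contains, hc']
        have hmap : (s.map (fun w => [w]) : List (List String)) ++ [[w]]
            = (s ++ [w]).map (fun w => [w]) := by simp
        rw [show ((s.map (fun w => [w]) : List (List String)) ++ [[w]], PySem.Set.add s w)
            = (((s ++ [w]).map (fun w => [w]) : List (List String)), ((s ++ [w] : List String) : PySem.Set String)) by rw [hadd, hmap]]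
        rw [ih (s ++ [w])]
        have hupd : PySem.Set.update s (w :: t.filter p) = PySem.Set.update (s ++ [w]) (t.filter p) := by
          simp only [PySem.Set.update, List.foldl_cons]
          rw [hadd]
        rw [hupd]
    · rw [if_neg hp]
      have hcond : (p w && !(PySem.Set.contains
          ((s.map (fun w => [w]) : List (List String)), (s : PySem.Set String)).2 w)) = false := by
        simp [hp]
      rw [hcond]
      simp only [Bool.false_eq_true, if_false]
      exact ih s

-- simulation: A's dedup of the pair stream vs B's set-based dedup
theorem pairsSim (Q : List (String × String)) :
    ∀ (u : List (List String)) (s : PySem.Set (String × String)),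
    (∀ k : String × String, u.contains (pvPlist k) = PySem.Set.contains s k) →
    Q.foldl (fun u q => pvDedupStep u [q.1, q.2]) u
      = (Q.foldl (fun st q =>
          if PySem.Set.contains st.2 (pvKeyOf q) then st
          else (st.1 ++ [pvPlist (pvKeyOf q)], PySem.Set.add st.2 (pvKeyOf q))) (u, s)).1
    ∧ (∀ k : String × String,
        (Q.foldl (fun st q =>
          if PySem.Set.contains st.2 (pvKeyOf q) then st
          else (st.1 ++ [pvPlist (pvKeyOf q)], PySem.Set.add st.2 (pvKeyOf q))) (u, s)).1.contains (pvPlist k)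
        = PySem.Set.contains ((Q.foldl (fun st q =>
          if PySem.Set.contains st.2 (pvKeyOf q) then st
          else (st.1 ++ [pvPlist (pvKeyOf q)], PySem.Set.add st.2 (pvKeyOf q))) (u, s)).2) k) := by
  induction Q with
  | nil => intro u s hU; exact ⟨rfl, hU⟩
  | cons q t ih =>
    intro u s hU
    simp only [List.foldl_cons]
    have hstepA : pvDedupStep u [q.1, q.2]
        = if PySem.Set.contains s (pvKeyOf q) then u else u ++ [pvPlist (pvKeyOf q)] := by
      unfold pvDedupStep
      rw [pair_sorted_key, hU (pvKeyOf q)]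
    by_cases hc : PySem.Set.contains s (pvKeyOf q)
    · rw [hstepA, if_pos hc, if_pos hc]
      exact ih u s hU
    · rw [hstepA, if_neg hc, if_neg hc]
      refine ih (u ++ [pvPlist (pvKeyOf q)]) (PySem.Set.add s (pvKeyOf q)) ?_
      intro k
      have hc' : pvKeyOf q ∉ s := by simpa [PySem.Set.contains] using hc
      have hadd : PySem.Set.add s (pvKeyOf q) = s ++ [pvKeyOf q] := by
        simp only [PySem.Set.add]
        rw [if_neg (by simp [PySem.Set.contains, hc'])]
      rw [hadd]
      simp only [PySem.Set.contains, List.contains_append, hU k, beq_plist,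
        List.contains_cons, List.contains_nil]

theorem pairfold_shape (Q : List (String × String)) :
    ∀ u : List (List String), ∃ r,
      Q.foldl (fun u q => pvDedupStep u [q.1, q.2]) u = u ++ r ∧ ∀ x ∈ r, x.length = 2 := by
  induction Q with
  | nil => intro u; exact ⟨[], by simp⟩
  | cons q t ih =>
    intro u
    simp only [List.foldl_cons]
    by_cases h : u.contains (PySem.List.sorted [q.1, q.2] (fun x => x) false)
    · rw [show pvDedupStep u [q.1, q.2] = u from by unfold pvDedupStep; rw [if_pos h]]
      exact ih u
    · rw [show pvDedupStep u [q.1, q.2]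
          = u ++ [PySem.List.sorted [q.1, q.2] (fun x => x) false] from by
        unfold pvDedupStep; rw [if_neg h]]
      obtain ⟨r, hr, h2⟩ := ih (u ++ [PySem.List.sorted [q.1, q.2] (fun x => x) false])
      refine ⟨PySem.List.sorted [q.1, q.2] (fun x => x) false :: r,
        by rw [hr, List.append_assoc]; rfl, ?_⟩
      intro x hx
      rcases List.mem_cons.1 hx with rfl | hx
      · rw [pair_sorted_key]; rfl
      · exact h2 x hx

theorem sorted_len_shape (S : List String) (r : List (List String))
    (h2 : ∀ x ∈ r, x.length = 2) :
    PySem.List.sorted ((S.map (fun w => [w])) ++ r) (fun x => x.length) false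
      = (S.map (fun w => [w])) ++ r := by
  apply PySem.List.sorted_eq_self_of_pairwise
  rw [List.pairwise_append]
  refine ⟨List.pairwise_of_forall_mem_list ?_, List.pairwise_of_forall_mem_list ?_, ?_⟩
  · intro a ha b hb
    obtain ⟨x, _, rfl⟩ := List.mem_map.1 ha
    obtain ⟨y, _, rfl⟩ := List.mem_map.1 hb
    simp
  · intro a ha b hb
    rw [h2 a ha, h2 b hb]
  · intro a ha b hb
    obtain ⟨x, _, rfl⟩ := List.mem_map.1 ha
    rw [h2 b hb]
    simp

theorem foldl_flatMap' {α β γ : Type} (g : γ → List α) (f : β → α → β) (l : List γ) :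
    ∀ init : β, (l.flatMap g).foldl f init = l.foldl (fun acc x => (g x).foldl f acc) init := by
  induction l with
  | nil => intro init; rfl
  | cons x t ih =>
    intro init
    rw [List.flatMap_cons, List.foldl_append, List.foldl_cons, ih]

-- the two port bodies with letters cleaned once (definitionally equal to the ports)
def pvBodyA (ls : List Char) (dict : List String) : List (List String) :=
  let letter_count := PySem.Dict.counter ls
  let solutions : List (List String) :=
    dict.foldl (fun acc word =>
      if word.toList.length ≤ ls.length &&
         pvCounterLe (PySem.Dict.counter word.toList) letter_count
      then acc ++ [[word]] else acc) []
  let solutions : List (List String) :=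
    dict.foldl (fun acc word1 =>
      if word1.toList.length < ls.length &&
         pvCounterLe (PySem.Dict.counter word1.toList) letter_count then
        let temp_count := pvCounterSub letter_count (PySem.Dict.counter word1.toList)
        let remaining := pvElements temp_count
        dict.foldl (fun acc word2 =>
          if word2.toList.length ≤ remaining.length &&
             pvCounterLe (PySem.Dict.counter word2.toList) temp_count then
            if word1.toList.length + word2.toList.length == ls.length
            then acc ++ [[word1, word2]] else acc
          else acc) acc
      else acc) solutions
  let unique_solutions : List (List String) :=
    solutions.foldl (fun u sol =>
      let sorted_sol := PySem.List.sorted sol (fun x => x) false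
      if u.contains sorted_sol then u else u ++ [sorted_sol]) []
  PySem.List.sorted unique_solutions (fun x => x.length) false

def pvBodyB (ls : List Char) (dict : List String) : List (List String) :=
  let n := ls.length
  let letter_count := PySem.Dict.counter ls
  let by_signature : PySem.Dict (List Char) (List String) :=
    dict.foldl (fun d word =>
      d.modify (pvSig word.toList) [] (· ++ [word])) PySem.Dict.empty
  let st1 : List (List String) × PySem.Set String :=
    dict.foldl (fun st word =>
      if word.toList.length ≤ n &&
         pvCounterLe (PySem.Dict.counter word.toList) letter_count &&
         !(PySem.Set.contains st.2 word)
      then (st.1 ++ [[word]], PySem.Set.add st.2 word) else st) ([], PySem.Set.empty)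
  let st2 : List (List String) × PySem.Set (String × String) :=
    dict.foldl (fun st word1 =>
      if word1.toList.length < n &&
         pvCounterLe (PySem.Dict.counter word1.toList) letter_count then
        let remaining :=
          pvSig (pvElements (pvCounterSub letter_count (PySem.Dict.counter word1.toList)))
        (by_signature.getD remaining []).foldl (fun st word2 =>
          let pair := if word1 ≤ word2 then (word1, word2) else (word2, word1)
          if PySem.Set.contains st.2 pair then st
          else (st.1 ++ [[pair.1, pair.2]], PySem.Set.add st.2 pair)) st
      else st) (st1.1, PySem.Set.empty)
  st2.1

theorem if_merge {α : Type} (a b : Bool) (x y : α) :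
    (if a then (if b then x else y) else y) = if a && b then x else y := by
  cases a <;> cases b <;> simp

theorem main_equiv (ls : List Char) (dict : List String) : pvBodyA ls dict = pvBodyB ls dict := by
  have hndlc := PySem.Dict.nodup_keys_counter (κ := Char) ls
  set p : String → Bool := fun w =>
    decide (w.toList.length ≤ ls.length) &&
      pvCounterLe (PySem.Dict.counter w.toList) (PySem.Dict.counter ls) with hp
  set c1 : String → Bool := fun w =>
    decide (w.toList.length < ls.length) &&
      pvCounterLe (PySem.Dict.counter w.toList) (PySem.Dict.counter ls) with hc1
  set inner : String → String → Bool := fun w1 w2 =>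
    (decide (w2.toList.length ≤ (pvRem ls w1).length) &&
      pvCounterLe (PySem.Dict.counter w2.toList) (pvTemp ls w1)) &&
    (w1.toList.length + w2.toList.length == ls.length) with hinner
  set QA : List (String × String) := dict.flatMap (fun w1 =>
    if c1 w1 then (dict.filter (inner w1)).map (fun w2 => (w1, w2)) else []) with hQA
  set S : List String := PySem.Set.update PySem.Set.empty (dict.filter p) with hS
  set u0 : List (List String) := S.map (fun w => [w]) with hu0
  -- facts extracted from c1
  have hcond1 : ∀ w1 : String, c1 w1 = true →
      (∀ c, w1.toList.count c ≤ ls.count c) ∧ w1.toList.length < ls.length := by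
    intro w1 h1
    rw [hc1, Bool.and_eq_true] at h1
    refine ⟨fun c => ?_, of_decide_eq_true h1.1⟩
    have := (cLe_iff w1.toList (PySem.Dict.counter ls) hndlc).1 h1.2 c
    rw [PySem.Dict.getD_counter] at this
    exact_mod_cast this
  -- ===== side A =====
  have hbodyA : pvBodyA ls dict =
      PySem.List.sorted
        ((dict.foldl (fun acc word1 =>
            if c1 word1 then
              dict.foldl (fun acc word2 =>
                if decide (word2.toList.length ≤
                      (pvElements (pvCounterSub (PySem.Dict.counter ls)
                        (PySem.Dict.counter word1.toList))).length) &&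
                   pvCounterLe (PySem.Dict.counter word2.toList)
                     (pvCounterSub (PySem.Dict.counter ls) (PySem.Dict.counter word1.toList)) then
                  if word1.toList.length + word2.toList.length == ls.length
                  then acc ++ [[word1, word2]] else acc
                else acc) acc
            else acc)
          (dict.foldl (fun acc word => if p word then acc ++ [[word]] else acc) [])).foldl
            pvDedupStep [])
        (fun x => x.length) false := rfl
  have hsol1 : dict.foldl (fun acc word => if p word then acc ++ [[word]] else acc) []
      = (dict.filter p).map (fun w => [w]) := by
    simpa using PySem.List.foldl_append_if p (fun w => [w]) dict []
  have hinstep : ∀ w1 : String,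
      (fun (acc : List (List String)) word2 =>
        if decide (word2.toList.length ≤
              (pvElements (pvCounterSub (PySem.Dict.counter ls)
                (PySem.Dict.counter w1.toList))).length) &&
           pvCounterLe (PySem.Dict.counter word2.toList)
             (pvCounterSub (PySem.Dict.counter ls) (PySem.Dict.counter w1.toList)) then
          if w1.toList.length + word2.toList.length == ls.length
          then acc ++ [[w1, word2]] else acc
        else acc)
      = (fun acc word2 => if inner w1 word2 then acc ++ [[w1, word2]] else acc) := by
    intro w1
    funext acc w2
    rw [if_merge]
    rfl
  have houter : (fun (acc : List (List String)) word1 =>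
      if c1 word1 then
        dict.foldl (fun acc word2 =>
          if decide (word2.toList.length ≤
                (pvElements (pvCounterSub (PySem.Dict.counter ls)
                  (PySem.Dict.counter word1.toList))).length) &&
             pvCounterLe (PySem.Dict.counter word2.toList)
               (pvCounterSub (PySem.Dict.counter ls) (PySem.Dict.counter word1.toList)) then
            if word1.toList.length + word2.toList.length == ls.length
            then acc ++ [[word1, word2]] else acc
          else acc) acc
      else acc)
      = (fun acc word1 => acc ++
          (if c1 word1 then (dict.filter (inner word1)).map (fun w2 => [word1, w2]) else [])) := by
    funext acc w1
    by_cases h1 : c1 w1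
    · rw [if_pos h1, if_pos h1, hinstep w1]
      exact PySem.List.foldl_append_if (inner w1) (fun w2 => [w1, w2]) dict acc
    · rw [if_neg h1, if_neg h1, List.append_nil]
  have hQP : dict.flatMap (fun w1 =>
        if c1 w1 then (dict.filter (inner w1)).map (fun w2 => [w1, w2]) else [])
      = QA.map (fun q => [q.1, q.2]) := by
    rw [hQA, List.map_flatMap]
    refine congrArg (fun g => List.flatMap g dict) (funext fun w1 => ?_)
    by_cases h1 : c1 w1
    · rw [if_pos h1, if_pos h1, List.map_map]
      rfl
    · rw [if_neg h1, if_neg h1]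
      rfl
  have hsingles : ((dict.filter p).map (fun w => [w])).foldl pvDedupStep [] = u0 := by
    simpa using dedupA_singles (dict.filter p) []
  obtain ⟨hsim, _⟩ := pairsSim QA u0 PySem.Set.empty
    (fun k => by rw [hu0, contains_map_singleton_pair]; rfl)
  obtain ⟨r, hr, h2⟩ := pairfold_shape QA u0
  have hA : pvBodyA ls dict = u0 ++ r := by
    rw [hbodyA, hsol1, houter, PySem.List.foldl_append_eq_flatMap, hQP, List.foldl_append,
      hsingles, List.foldl_map]
    simp only [hr]
    rw [hu0]
    exact sorted_len_shape S r h2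
  -- ===== side B =====
  have hbodyB : pvBodyB ls dict =
      (dict.foldl (fun st word1 =>
        if c1 word1 then
          ((dict.foldl (fun d word =>
              d.modify (pvSig word.toList) [] (· ++ [word])) PySem.Dict.empty).getD
            (pvSig (pvElements (pvCounterSub (PySem.Dict.counter ls)
              (PySem.Dict.counter word1.toList)))) []).foldl (fun st word2 =>
            let pair := if word1 ≤ word2 then (word1, word2) else (word2, word1)
            if PySem.Set.contains st.2 pair then st
            else (st.1 ++ [[pair.1, pair.2]], PySem.Set.add st.2 pair)) st
        else st)
        ((dict.foldl (fun st word =>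
            if p word && !(PySem.Set.contains st.2 word)
            then (st.1 ++ [[word]], PySem.Set.add st.2 word) else st)
          ([], PySem.Set.empty)).1, PySem.Set.empty)).1 := rfl
  have hst1 : dict.foldl (fun st word =>
        if p word && !(PySem.Set.contains st.2 word)
        then (st.1 ++ [[word]], PySem.Set.add st.2 word) else st)
      ([], PySem.Set.empty) = (u0, S) := singlesB p dict []
  have hBout : (fun (st : List (List String) × PySem.Set (String × String)) word1 =>
      if c1 word1 then
        ((dict.foldl (fun d word =>
            d.modify (pvSig word.toList) [] (· ++ [word])) PySem.Dict.empty).getD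
          (pvSig (pvElements (pvCounterSub (PySem.Dict.counter ls)
            (PySem.Dict.counter word1.toList)))) []).foldl (fun st word2 =>
          let pair := if word1 ≤ word2 then (word1, word2) else (word2, word1)
          if PySem.Set.contains st.2 pair then st
          else (st.1 ++ [[pair.1, pair.2]], PySem.Set.add st.2 pair)) st
      else st)
      = (fun st word1 =>
          (if c1 word1 then (dict.filter (inner word1)).map (fun w2 => (word1, w2)) else []).foldl
            (fun st q =>
              if PySem.Set.contains st.2 (pvKeyOf q) then st
              else (st.1 ++ [pvPlist (pvKeyOf q)], PySem.Set.add st.2 (pvKeyOf q))) st) := by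
    funext st w1
    by_cases h1 : c1 w1
    · rw [if_pos h1, if_pos h1]
      obtain ⟨hle1, hlen1⟩ := hcond1 w1 h1
      rw [bucket_getD dict (pvSig (pvElements (pvCounterSub (PySem.Dict.counter ls)
        (PySem.Dict.counter w1.toList))))]
      have hfilter : dict.filter (fun w2 => pvSig w2.toList ==
            pvSig (pvElements (pvCounterSub (PySem.Dict.counter ls)
              (PySem.Dict.counter w1.toList))))
          = dict.filter (inner w1) :=
        List.filter_congr (fun w2 _ => (inner_iff ls w1 w2 hle1 hlen1).symm)
      rw [hfilter]
      exact (List.foldl_map (f := fun w2 => (w1, w2))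
        (g := fun st q =>
          if PySem.Set.contains st.2 (pvKeyOf q) then st
          else (st.1 ++ [pvPlist (pvKeyOf q)], PySem.Set.add st.2 (pvKeyOf q)))
        (l := List.filter (inner w1) dict) (init := st)).symm
    · rw [if_neg h1, if_neg h1]
      rfl
  obtain ⟨hsim2, _⟩ := pairsSim QA u0 PySem.Set.empty
    (fun k => by rw [hu0, contains_map_singleton_pair]; rfl)
  have hB : pvBodyB ls dict = (QA.foldl (fun st q =>
      if PySem.Set.contains st.2 (pvKeyOf q) then st
      else (st.1 ++ [pvPlist (pvKeyOf q)], PySem.Set.add st.2 (pvKeyOf q))) (u0, PySem.Set.empty)).1 := by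
    rw [hbodyB, hst1, hBout, hQA]
    rw [(foldl_flatMap' (fun w1 => if c1 w1 = true then (dict.filter (inner w1)).map (fun w2 => (w1, w2)) else [])
      (fun st q =>
        if PySem.Set.contains st.2 (pvKeyOf q) then st
        else (st.1 ++ [pvPlist (pvKeyOf q)], PySem.Set.add st.2 (pvKeyOf q))) dict ((u0, S).1, PySem.Set.empty)).symm]
  rw [hA, hB, ← hsim2, hr]

theorem portA_eq_body (letters : String) (dictionary : List String) :
    solve_anagram letters dictionary = pvBodyA (pvClean letters) dictionary := rfl

theorem portB_eq_body (letters : String) (dictionary : List String) :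
    solve_anagram_alt letters dictionary = pvBodyB (pvClean letters) dictionary := rfl

-- ===== VERDICT (by name: the statement is the Claim_ definition above) =====
theorem solve_anagram_spec : Claim_equal_solve_anagram := by
  intro letters dictionary _
  unfold Spec_solve_anagram
  rw [portA_eq_body, portB_eq_body]
  exact main_equiv (pvClean letters) dictionary
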